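-- pv_equiv track=rewrite | github.com/MatthijsdeHeus/AdventOfCode | 2022/3.py | part2
-- ===== SOURCE A (Python) =====
-- import string
--
-- def part2(input):
--     index = 0
--
--     counter = 0
--
--     while(index + 2 < len(input)):
--         row1 = input[index]
--         row2 = input[index + 1]
--         row3 = input[index + 2]
--
--         commonLetter = getCommonLetter3Lists(row1, row2, row3)
--
--         if commonLetter.isupper():
--             counter += string.ascii_uppercase.index(commonLetter) + 27
--         else:
--             counter += string.ascii_lowercase.index(commonLetter) + 1
--
--         index += 3
--
--     return counter
--
-- def getCommonLetter3Lists(list1, list2, list3):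
--     common = []
--
--     for secondListItem in list1:
--         if secondListItem in list2:
--             common.append(secondListItem)
--
--     for item in common:
--         if item in list3:
--             return item
-- ===== SOURCE B (Python) =====
-- def part2(input):
--     total = 0
--     masks = {}
--     row1 = ""
--     for i, line in enumerate(input):
--         r = i % 3
--         if r == 0:
--             row1, masks = line, {}
--         else:
--             for ch in line:
--                 masks[ch] = masks.get(ch, 0) | r
--             if r == 2:
--                 c = next(ch for ch in row1 if masks.get(ch, 0) == 3)
--                 total += ord(c) - 38 if c.isupper() else ord(c) - 96
--     return total
-- ===== Notes on version B (the rewrite author's own statement) =====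
-- stated objective: alternative
-- what changed: A's indexed while loop with a helper doing two sequential membership passes per group (collect row1 chars found in row2, then rescan that list against row3) and alphabet .index lookups is replaced by a single streaming state machine over enumerate(input): i%3 selects the phase, rows 2 and 3 OR their phase bit into a per-group char->bitmask dict, and the score is the first row1 char whose mask is 3, with the priority computed in closed form from ord().
-- outside the precondition, e.g. on part2(['ab', 'cd', 'ef']): A raises AttributeError, B raises StopIteration; on part2(['11', '1', '1']): A raises ValueError, B returns -47
import Mathlib
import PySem

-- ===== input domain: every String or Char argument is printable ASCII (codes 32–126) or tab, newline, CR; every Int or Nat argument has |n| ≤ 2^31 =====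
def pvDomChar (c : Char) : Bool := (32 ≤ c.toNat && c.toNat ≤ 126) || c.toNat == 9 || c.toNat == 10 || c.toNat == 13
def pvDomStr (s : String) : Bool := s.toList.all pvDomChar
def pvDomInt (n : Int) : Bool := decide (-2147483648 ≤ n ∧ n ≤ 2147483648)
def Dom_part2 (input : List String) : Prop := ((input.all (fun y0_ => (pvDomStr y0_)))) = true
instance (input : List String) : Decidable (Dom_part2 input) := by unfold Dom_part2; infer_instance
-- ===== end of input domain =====

-- B replaces A's indexed while loop and per-group double membership passes by a single streaming
-- state machine over enumerate(input) (i % 3 phases) with a per-group char → row-bitmask dict;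
-- same return values on Pre_.

-- ===== PORT A =====
-- second loop of getCommonLetter3Lists: first element of `common` also found in list3 (None fall-through → none)
def gclFindLoop (common : List Char) (list3 : List Char) : Option Char :=
  match common with
  | [] => none
  | item :: rest => if list3.contains item then some item else gclFindLoop rest list3

def getCommonLetter3Lists (list1 list2 list3 : List Char) : Option Char :=
  gclFindLoop (list1.foldl (fun common c => if list2.contains c then common ++ [c] else common) []) list3

def asciiUppercase : List Char :=
  ['A','B','C','D','E','F','G','H','I','J','K','L','M','N','O','P','Q','R','S','T','U','V','W','X','Y','Z']
def asciiLowercase : List Char :=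
  ['a','b','c','d','e','f','g','h','i','j','k','l','m','n','o','p','q','r','s','t','u','v','w','x','y','z']

-- A's while loop (index += 3) as the obvious structural recursion on the remaining rows
-- (index + 2 < len(input) ↔ at least three rows remain). Where the Python raises
-- (AttributeError on None, ValueError from .index on a non-letter) — inputs excluded by Pre_ —
-- the port returns the running counter / uses .getD 0.
def part2Loop (rows : List String) (counter : Int) : Int :=
  match rows with
  | row1 :: row2 :: row3 :: rest =>
    match getCommonLetter3Lists row1.toList row2.toList row3.toList with
    | some commonLetter =>
        part2Loop rest (counter +
          (if PySem.Chars.isupper commonLetter then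
            (((PySem.List.index? asciiUppercase commonLetter).getD 0 : Nat) : Int) + 27
          else
            (((PySem.List.index? asciiLowercase commonLetter).getD 0 : Nat) : Int) + 1))
    | none => counter
  | _ => counter

def part2 (input : List String) : Int := part2Loop input 0

-- ===== PORT B =====
-- literal port of Source B's loop body: r = i % 3; phase 0 resets row1/masks, phases 1 and 2 OR the
-- phase bit into each character's mask, phase 2 scores the first row1 char with mask 3.
-- next(...) raising StopIteration (no common char, excluded by Pre_) is ported as the none branch.
def part2AltStep (st : Int × PySem.Dict Char Int × String) (p : Int × String) :
    Int × PySem.Dict Char Int × String :=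
  let total := st.1
  let masks := st.2.1
  let row1 := st.2.2
  let r := PySem.Int.mod p.1 3
  if r == 0 then (total, PySem.Dict.empty, p.2)
  else
    let masks := p.2.toList.foldl (fun m ch => m.insert ch (PySem.Int.bor (m.getD ch 0) r)) masks
    if r == 2 then
      match row1.toList.find? (fun ch => masks.getD ch 0 == 3) with
      | some c =>
          (total + (if PySem.Chars.isupper c then (c.toNat : Int) - 38 else (c.toNat : Int) - 96),
           masks, row1)
      | none => (total, masks, row1)
    else (total, masks, row1)

def part2_alt (input : List String) : Int :=
  ((PySem.List.enumerate input).foldl part2AltStep (0, PySem.Dict.empty, "")).1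

-- ===== PRECONDITION & SPEC =====
-- the first character of a group's row1 that occurs in row2 and row3 (A's commonLetter)
def firstCommon (row1 row2 row3 : List Char) : Option Char :=
  row1.find? (fun c => row2.contains c && row3.contains c)

def goodGroup (row1 row2 row3 : String) : Bool :=
  match firstCommon row1.toList row2.toList row3.toList with
  | some c => PySem.Chars.isupper c || PySem.Chars.islower c
  | none => false

-- Pre_ excludes exactly the inputs where A raises: a 3-row group with no character common to all
-- three rows (AttributeError: None.isupper()), or whose first common character is not an ASCII
-- letter (ValueError from ascii_lowercase.index).
def Pre_part2 (input : List String) : Prop :=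
  ∀ i ∈ List.range (input.length / 3),
    goodGroup (input.getD (3 * i) "") (input.getD (3 * i + 1) "") (input.getD (3 * i + 2) "") = true
instance (input : List String) : Decidable (Pre_part2 input) := by unfold Pre_part2; infer_instance

def pvWitness_part2 : List String := ["abc", "cde", "fcg", "PQ", "QR", "SQ"]

def Spec_part2 (input : List String) (out : Int) : Prop := out = part2_alt input
instance (input : List String) (out : Int) : Decidable (Spec_part2 input out) := by unfold Spec_part2; infer_instance

-- ===== CLAIM (what is proved, stated in full; the proofs are below) =====
def Claim_equal_part2 : Prop := ∀ (input : List String), Dom_part2 input → Pre_part2 input → Spec_part2 input (part2 input)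

-- ===== LEMMAS AND PROOFS =====

-- the common value of both programs: one group of three rows at a time
def groupScore (a b c : String) : Int :=
  match firstCommon a.toList b.toList c.toList with
  | some ch => if PySem.Chars.isupper ch then (ch.toNat : Int) - 38 else (ch.toNat : Int) - 96
  | none => 0

def partScore : List String → Int
  | a :: b :: c :: rest => groupScore a b c + partScore rest
  | _ => 0

-- ---- A-side lemmas ----

lemma gclFindLoop_eq (l3 : List Char) : ∀ l : List Char, gclFindLoop l l3 = l.find? (fun c => l3.contains c)
  | [] => rfl
  | a :: t => by
      rw [gclFindLoop, List.find?_cons]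
      cases h : l3.contains a <;> simp [gclFindLoop_eq l3 t]

lemma getCommon_eq_firstCommon (l1 l2 l3 : List Char) :
    getCommonLetter3Lists l1 l2 l3 = firstCommon l1 l2 l3 := by
  unfold getCommonLetter3Lists firstCommon
  rw [PySem.List.foldl_append_if_eq_filter, List.nil_append, gclFindLoop_eq, List.find?_filter]
  congr 1
  funext a
  cases h2 : l2.contains a <;> cases h3 : l3.contains a <;> simp

lemma isupper_bounds (c : Char) (h : PySem.Chars.isupper c = true) : 65 ≤ c.toNat ∧ c.toNat ≤ 90 := by
  simp [PySem.Chars.isupper, Char.le_def, UInt32.le_iff_toNat_le] at h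
  exact h

lemma islower_bounds (c : Char) (h : PySem.Chars.islower c = true) : 97 ≤ c.toNat ∧ c.toNat ≤ 122 := by
  simp [PySem.Chars.islower, Char.le_def, UInt32.le_iff_toNat_le] at h
  exact h

lemma index_upper (c : Char) (h : PySem.Chars.isupper c = true) :
    PySem.List.index? asciiUppercase c = some (c.toNat - 65) := by
  obtain ⟨h1, h2⟩ := isupper_bounds c h
  obtain ⟨n, hn1, hn2, rfl⟩ : ∃ n, 65 ≤ n ∧ n ≤ 90 ∧ c = Char.ofNat n :=
    ⟨c.toNat, h1, h2, (Char.ofNat_toNat c).symm⟩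
  interval_cases n <;> decide

lemma index_lower (c : Char) (h : PySem.Chars.islower c = true) :
    PySem.List.index? asciiLowercase c = some (c.toNat - 97) := by
  obtain ⟨h1, h2⟩ := islower_bounds c h
  obtain ⟨n, hn1, hn2, rfl⟩ : ∃ n, 97 ≤ n ∧ n ≤ 122 ∧ c = Char.ofNat n :=
    ⟨c.toNat, h1, h2, (Char.ofNat_toNat c).symm⟩
  interval_cases n <;> decide

lemma Pre_tail (a b c : String) (rest : List String) (h : Pre_part2 (a :: b :: c :: rest)) :
    Pre_part2 rest := by
  intro i hi
  rw [List.mem_range] at hi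
  have hm : i + 1 ∈ List.range ((a :: b :: c :: rest).length / 3) := by
    rw [List.mem_range]
    simp only [List.length_cons]
    omega
  have this1 := h (i + 1) hm
  have e0 : ∀ (n : Nat) (s : String), (a :: b :: c :: rest).getD (n + 3) s = rest.getD n s :=
    fun n s => rfl
  rw [show 3 * (i + 1) = 3 * i + 3 by ring, show 3 * i + 3 + 1 = (3 * i + 1) + 3 by omega,
      show 3 * i + 3 + 2 = (3 * i + 2) + 3 by omega, e0, e0, e0] at this1
  exact this1

theorem part2Loop_eq : ∀ (input : List String), Pre_part2 input → ∀ counter : Int,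
    part2Loop input counter = counter + partScore input
  | [] => by intro _ counter; simp [part2Loop, partScore]
  | [a] => by intro _ counter; simp [part2Loop, partScore]
  | [a, b] => by intro _ counter; simp [part2Loop, partScore]
  | a :: b :: c :: rest => by
    intro hpre counter
    have hg0 := hpre 0 (by rw [List.mem_range]; simp only [List.length_cons]; omega)
    simp only [Nat.mul_zero, List.getD_cons_zero, Nat.zero_add, List.getD_cons_succ] at hg0
    unfold goodGroup at hg0
    cases hfc : firstCommon a.toList b.toList c.toList with
    | none => rw [hfc] at hg0; cases hg0
    | some ch =>
      rw [hfc] at hg0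
      simp only [] at hg0
      rw [part2Loop, getCommon_eq_firstCommon, hfc]
      simp only []
      rw [part2Loop_eq rest (Pre_tail a b c rest hpre)]
      rw [partScore]
      unfold groupScore
      rw [hfc]
      simp only []
      cases hu : PySem.Chars.isupper ch with
      | true =>
        rw [index_upper ch hu]
        obtain ⟨hb1, hb2⟩ := isupper_bounds ch hu
        simp only [if_true, Option.getD_some]
        push_cast [Nat.cast_sub hb1]
        ring
      | false =>
        have hlo : PySem.Chars.islower ch = true := by
          cases hll : PySem.Chars.islower ch
          · rw [hu, hll] at hg0; cases hg0
          · rfl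
        rw [index_lower ch hlo]
        obtain ⟨hb1, hb2⟩ := islower_bounds ch hlo
        simp only [if_false, Option.getD_some, Bool.false_eq_true]
        push_cast [Nat.cast_sub hb1]
        ring

-- ---- B-side lemmas ----

lemma bor_bor_self (a r : Int) (ha : 0 ≤ a) (hr : 0 ≤ r) :
    PySem.Int.bor (PySem.Int.bor a r) r = PySem.Int.bor a r := by
  rw [PySem.Int.bor_of_nonneg ha hr, PySem.Int.bor_of_nonneg (by positivity) hr]
  simp

lemma fold_mask (r : Int) (hr : 0 ≤ r) :
    ∀ (l : List Char) (m : PySem.Dict Char Int), (∀ y, 0 ≤ m.getD y 0) → ∀ x,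
      ((l.foldl (fun m ch => m.insert ch (PySem.Int.bor (m.getD ch 0) r)) m).getD x 0)
        = if x ∈ l then PySem.Int.bor (m.getD x 0) r else m.getD x 0
  | [], m, hm, x => by simp
  | h :: t, m, hm, x => by
    rw [List.foldl_cons]
    have hm' : ∀ y, 0 ≤ (m.insert h (PySem.Int.bor (m.getD h 0) r)).getD y 0 := by
      intro y
      rw [PySem.Dict.getD_insert]
      split
      · rw [PySem.Int.bor_of_nonneg (hm h) hr]; positivity
      · exact hm y
    rw [fold_mask r hr t _ hm' x, PySem.Dict.getD_insert]
    by_cases hx : x = h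
    · subst hx
      rw [if_pos rfl, if_pos List.mem_cons_self]
      by_cases hmem : x ∈ t
      · rw [if_pos hmem]; exact bor_bor_self _ r (hm x) hr
      · rw [if_neg hmem]
    · rw [if_neg hx]
      have hiff : x ∈ h :: t ↔ x ∈ t := by simp [List.mem_cons, hx]
      by_cases hmem : x ∈ t
      · rw [if_pos hmem, if_pos (hiff.mpr hmem)]
      · rw [if_neg hmem, if_neg (fun hh => hmem (hiff.mp hh))]

lemma empty_getD (x : Char) : (PySem.Dict.empty : PySem.Dict Char Int).getD x 0 = 0 := rfl

lemma empty_nonneg : ∀ y : Char, 0 ≤ (PySem.Dict.empty : PySem.Dict Char Int).getD y 0 :=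
  fun y => by rw [empty_getD y]

-- after phases 1 and 2, a char's mask is 3 exactly when it occurs in both row2 and row3
lemma mask_eq_three (b c : List Char) (x : Char) :
    (((c.foldl (fun m ch => m.insert ch (PySem.Int.bor (m.getD ch 0) 2))
        (b.foldl (fun m ch => m.insert ch (PySem.Int.bor (m.getD ch 0) 1))
          (PySem.Dict.empty : PySem.Dict Char Int))).getD x 0) == (3 : Int))
      = (b.contains x && c.contains x) := by
  have h1 : ∀ y, ((b.foldl (fun m ch => m.insert ch (PySem.Int.bor (m.getD ch 0) 1))
      (PySem.Dict.empty : PySem.Dict Char Int)).getD y 0) = if y ∈ b then 1 else 0 := by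
    intro y
    rw [fold_mask 1 (by norm_num) b _ empty_nonneg y, empty_getD]
    split
    · decide
    · rfl
  have h1n : ∀ y, 0 ≤ ((b.foldl (fun m ch => m.insert ch (PySem.Int.bor (m.getD ch 0) 1))
      (PySem.Dict.empty : PySem.Dict Char Int)).getD y 0) := by
    intro y; rw [h1 y]; split <;> norm_num
  rw [fold_mask 2 (by norm_num) c _ h1n x, h1 x]
  by_cases hb : x ∈ b <;> by_cases hc : x ∈ c <;>
    simp [hb, hc, List.contains_eq_mem] <;> decide

lemma mask_find_eq (r1 b c : List Char) :
    r1.find? (fun ch =>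
        ((c.foldl (fun m ch => m.insert ch (PySem.Int.bor (m.getD ch 0) 2))
          (b.foldl (fun m ch => m.insert ch (PySem.Int.bor (m.getD ch 0) 1))
            (PySem.Dict.empty : PySem.Dict Char Int))).getD ch 0) == (3 : Int))
      = firstCommon r1 b c := by
  unfold firstCommon
  congr 1
  funext ch
  exact mask_eq_three b c ch

lemma mod3_eval (s : Int) : PySem.Int.mod s 3 = s % 3 := by
  simp [PySem.Int.mod, Int.fmod_eq_emod]

theorem altFold_eq : ∀ (l : List String) (s : Int), 0 ≤ s → s % 3 = 0 →
    ∀ (t : Int) (m : PySem.Dict Char Int) (row : String),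
      ((PySem.List.enumerate l s).foldl part2AltStep (t, m, row)).1 = t + partScore l
  | [], s, hs, hmod, t, m, row => by
    simp [PySem.List.enumerate_nil, partScore]
  | [a], s, hs, hmod, t, m, row => by
    rw [PySem.List.enumerate_cons, PySem.List.enumerate_nil]
    simp only [List.foldl_cons, List.foldl_nil]
    simp only [part2AltStep, mod3_eval, hmod]
    simp [partScore]
  | [a, b], s, hs, hmod, t, m, row => by
    rw [PySem.List.enumerate_cons, PySem.List.enumerate_cons, PySem.List.enumerate_nil]
    simp only [List.foldl_cons, List.foldl_nil]
    simp only [part2AltStep, mod3_eval, hmod, show (s + 1) % 3 = 1 by omega]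
    simp [partScore]
  | a :: b :: c :: rest, s, hs, hmod, t, m, row => by
    rw [PySem.List.enumerate_cons, PySem.List.enumerate_cons, PySem.List.enumerate_cons]
    simp only [List.foldl_cons]
    simp only [part2AltStep, mod3_eval, hmod, show (s + 1) % 3 = 1 by omega,
      show (s + 1 + 1) % 3 = 2 by omega]
    simp only [show ((0 : Int) == 0) = true from rfl, show ((1 : Int) == 0) = false from rfl,
      show ((1 : Int) == 2) = false from rfl, show ((2 : Int) == 0) = false from rfl,
      show ((2 : Int) == 2) = true from rfl, if_true, if_false, Bool.false_eq_true]
    simp only [mask_find_eq]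
    have hrec := altFold_eq rest (s + 1 + 1 + 1) (by omega) (by omega)
    cases hfc : firstCommon a.toList b.toList c.toList with
    | none =>
      simp only [hrec, partScore]
      unfold groupScore
      rw [hfc]
      ring
    | some ch =>
      simp only [hrec, partScore]
      unfold groupScore
      rw [hfc]
      ring

lemma part2_alt_eq_partScore (input : List String) : part2_alt input = partScore input := by
  unfold part2_alt
  rw [altFold_eq input 0 (by norm_num) (by norm_num)]
  ring

-- ===== VERDICT (by name: the statement is the Claim_ definition above) =====
theorem part2_spec : Claim_equal_part2 := by
  intro input _ hpre
  unfold Spec_part2 part2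
  rw [part2Loop_eq input hpre, part2_alt_eq_partScore]
  ring
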